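-- pv_equiv track=rewrite | github.com/Nev-Iva/algorithms-python | hw9/hw9_2.py | decode_func
-- ===== SOURCE A (Python) =====
-- def decode_func(encoded, code):
--     ex_list =[]
--     null_str = ""
--     for el in encoded:
--         null_str += el
--         for dec_ch in code:
--             if code.get(dec_ch) == null_str:
--                 ex_list.append(dec_ch)
--                 null_str = ""
--                 break
--     return "".join(ex_list)
-- ===== SOURCE B (Python) =====
-- def decode_func(encoded, code):
--     # Build a trie over the code VALUES (storing, at each value's end node, the
--     # FIRST key in dict order that has that value; the root is never terminal,
--     # so the empty value can never match).  Then decode in one walk: descend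
--     # edge by edge; on reaching a terminal node emit its key and restart at the
--     # root; if an edge is missing the remaining input can never match again
--     # (the buffer is no longer a prefix of any value), so stop emitting.
--     root = [None, {}]  # node = [stored key or None, {char: child node}]
--     for key, value in code.items():
--         if not value:
--             continue
--         node = root
--         for ch in value:
--             node = node[1].setdefault(ch, [None, {}])
--         if node[0] is None:
--             node[0] = key
--     out = []
--     node = root
--     for ch in encoded:
--         node = node[1].get(ch)
--         if node is None:
--             break
--         if node[0] is not None:
--             out.append(node[0])
--             node = root
--     return "".join(out)
-- ===== Notes on version B (the rewrite author's own statement) =====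
-- stated objective: faster
-- what changed: B builds a trie over the code values (end nodes store the first key per value) and decodes in a single walk with one child-edge step per character, stopping when the walk falls off the trie, instead of A's per-character rescan of every code key against a growing buffer.
import Mathlib
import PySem

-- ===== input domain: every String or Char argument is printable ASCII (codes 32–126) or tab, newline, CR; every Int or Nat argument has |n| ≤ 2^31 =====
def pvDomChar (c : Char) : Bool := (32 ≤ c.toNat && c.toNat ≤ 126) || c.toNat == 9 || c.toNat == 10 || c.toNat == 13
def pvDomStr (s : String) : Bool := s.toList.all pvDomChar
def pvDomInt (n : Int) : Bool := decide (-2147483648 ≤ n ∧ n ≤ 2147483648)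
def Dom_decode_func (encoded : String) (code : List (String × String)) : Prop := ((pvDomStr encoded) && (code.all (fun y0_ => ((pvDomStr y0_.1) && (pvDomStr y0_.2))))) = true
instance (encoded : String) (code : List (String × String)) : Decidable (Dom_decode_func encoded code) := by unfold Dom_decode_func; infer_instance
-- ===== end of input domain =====

-- B replaces A's per-character rescan of all code keys by a trie built once over the code values (objective: faster).

-- ===== PORT A =====
-- inner 'for dec_ch in code: if code.get(dec_ch) == null_str: append; null_str = ""; break'
def decodeScanA (d : PySem.Dict String String) (ks : List String) (ex : List (List Char)) (acc : List Char) : List (List Char) × List Char :=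
  match ks with
  | [] => (ex, acc)
  | k :: rest =>
      if d.get? k = some (String.ofList acc) then (ex ++ [k.toList], [])
      else decodeScanA d rest ex acc

def decode_func (encoded : String) (code : List (String × String)) : String :=
  let d := PySem.Dict.ofList code
  let r := encoded.toList.foldl
    (fun (s : List (List Char) × List Char) el => decodeScanA d d.keys s.1 (s.2 ++ [el]))
    ([], [])
  String.ofList r.1.flatten

-- ===== PORT B =====
-- trie node '[key_or_None, {ch: child}]'; children as an explicit list (nested inductives are not allowed)
mutual
inductive BTrie where
  | node : Option String → BChildren → BTrie
inductive BChildren where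
  | nil : BChildren
  | cons : Char → BTrie → BChildren → BChildren
end

def BTrie.key : BTrie → Option String
  | .node k _ => k

def BTrie.children : BTrie → BChildren
  | .node _ c => c

-- children dict lookup: node[1].get(ch)
def childGetB : BChildren → Char → Option BTrie
  | .nil, _ => none
  | .cons c' t rest, c => if c' = c then some t else childGetB rest c

-- children dict write-back: node[1][ch] = t (overwrite in place, new chars append)
def childSetB : BChildren → Char → BTrie → BChildren
  | .nil, c, t => .cons c t .nil
  | .cons c' t0 rest, c, t => if c' = c then .cons c' t rest else .cons c' t0 (childSetB rest c t)

-- 'node = node[1].setdefault(ch, [None, {}])' along the value, then 'if node[0] is None: node[0] = key'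
-- (Python mutates the shared nodes in place; the port performs the same update functionally, writing
-- the recursively updated child back on the path)
def insertB : BTrie → List Char → String → BTrie
  | t, [], k => .node (match t.key with | none => some k | some k0 => some k0) t.children
  | t, c :: rest, k =>
      let child := (childGetB t.children c).getD (.node none .nil)
      .node t.key (childSetB t.children c (insertB child rest k))

def buildB (items : List (String × String)) : BTrie :=
  items.foldl (fun t kv => if kv.2 = "" then t else insertB t kv.2.toList kv.1) (.node none .nil)

def decode_func_alt (encoded : String) (code : List (String × String)) : String :=
  let root := buildB (PySem.Dict.ofList code).items
  -- 'for ch in encoded: node = node[1].get(ch); if node is None: break; …'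
  -- (once the state is none it never changes, which is Python's break)
  let r := encoded.toList.foldl
    (fun (s : List (List Char) × Option BTrie) ch =>
      match s.2 with
      | none => s
      | some t =>
        match childGetB t.children ch with
        | none => (s.1, none)
        | some t' =>
          match t'.key with
          | some k => (s.1 ++ [k.toList], some root)
          | none => (s.1, some t'))
    ([], some root)
  String.ofList r.1.flatten

-- ===== PRECONDITION & SPEC =====
def Spec_decode_func (encoded : String) (code : List (String × String)) (out : String) : Prop := out = decode_func_alt encoded code
instance (encoded : String) (code : List (String × String)) (out : String) : Decidable (Spec_decode_func encoded code out) := by unfold Spec_decode_func; infer_instance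

-- ===== CLAIM (what is proved, stated in full; the proofs are below) =====
def Claim_equal_decode_func : Prop := ∀ (encoded : String) (code : List (String × String)), Dom_decode_func encoded code → Spec_decode_func encoded code (decode_func encoded code)

-- ===== LEMMAS AND PROOFS =====

@[simp] lemma BTrie_key_node (k : Option String) (ch : BChildren) : (BTrie.node k ch).key = k := rfl
@[simp] lemma BTrie_children_node (k : Option String) (ch : BChildren) : (BTrie.node k ch).children = ch := rfl

-- walking the trie along a string
def walkT : BTrie → List Char → Option BTrie
  | t, [] => some t
  | t, c :: rest => (childGetB t.children c).bind (fun t' => walkT t' rest)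

-- key stored at the end of a path ('none' also when the path is absent)
def kAT (t : BTrie) (s : List Char) : Option String :=
  (walkT t s).bind BTrie.key

@[simp] lemma kAT_nil (t : BTrie) : kAT t [] = t.key := rfl

lemma kAT_cons (t : BTrie) (c : Char) (s : List Char) :
    kAT t (c :: s) = (childGetB t.children c).bind (fun t' => kAT t' s) := by
  simp [kAT, walkT]
  cases childGetB t.children c <;> simp

lemma walkT_append (s u : List Char) : ∀ (t : BTrie),
    walkT t (s ++ u) = (walkT t s).bind (fun t' => walkT t' u) := by
  induction s with
  | nil => intro t; simp [walkT]
  | cons c rest ih =>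
      intro t
      simp only [List.cons_append, walkT, Option.bind_assoc]
      cases childGetB t.children c with
      | none => simp
      | some t' => simp [ih t']

lemma childGet_childSet : ∀ (ch : BChildren) (c : Char) (t : BTrie) (c' : Char),
    childGetB (childSetB ch c t) c' = if c = c' then some t else childGetB ch c'
  | .nil, c, t, c' => by
      by_cases h : c = c' <;> simp [childSetB, childGetB, h]
  | .cons c0 t0 rest, c, t, c' => by
      by_cases h0 : c0 = c
      · subst h0
        by_cases h : c0 = c' <;> simp [childSetB, childGetB, h]
      · by_cases h : c0 = c'
        · subst h
          simp [childSetB, childGetB, if_neg h0,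
            if_neg (show ¬ c = c0 from fun hc => h0 hc.symm)]
        · simp [childSetB, childGetB, if_neg h0, h, childGet_childSet rest c t c']

-- the child actually used by insertB agrees with walking one step
lemma kAT_child (t : BTrie) (c : Char) (s : List Char) :
    kAT ((childGetB t.children c).getD (.node none .nil)) s = kAT t (c :: s) := by
  rw [kAT_cons]
  cases h : childGetB t.children c with
  | some tc => simp
  | none =>
      cases s with
      | nil => simp [kAT, walkT]
      | cons c' rest => simp [kAT_cons, childGetB]

-- insert changes the stored key exactly at its own path (keeping an existing key)
lemma kAT_insertB (cs : List Char) : ∀ (t : BTrie) (k : String) (s : List Char),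
    kAT (insertB t cs k) s = if s = cs then some ((kAT t cs).getD k) else kAT t s := by
  induction cs with
  | nil =>
      intro t k s
      cases s with
      | nil =>
          simp only [insertB, kAT_nil, BTrie_key_node]
          cases t.key <;> simp
      | cons c rest =>
          simp [insertB, kAT_cons]
  | cons c0 cs' ih =>
      intro t k s
      cases s with
      | nil => simp [insertB]
      | cons c rest =>
          by_cases hc : c0 = c
          · subst hc
            have h1 : kAT (insertB t (c0 :: cs') k) (c0 :: rest)
                = kAT (insertB ((childGetB t.children c0).getD (.node none .nil)) cs' k) rest := by
              simp [insertB, kAT_cons, childGet_childSet]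
            rw [h1, ih, kAT_child, kAT_child]
            by_cases hr : rest = cs'
            · simp [hr]
            · rw [if_neg hr, if_neg (fun h : c0 :: rest = c0 :: cs' => hr (by injection h))]
          · have h1 : kAT (insertB t (c0 :: cs') k) (c :: rest) = kAT t (c :: rest) := by
              simp [insertB, kAT_cons, childGet_childSet, hc]
            rw [h1,
              if_neg (fun h : c :: rest = c0 :: cs' => hc (by injection h with h1 _; exact h1.symm))]

lemma build_go (l : List (String × String)) : ∀ (t : BTrie) (s : List Char), s ≠ [] →
    kAT (l.foldl (fun t kv => if kv.2 = "" then t else insertB t kv.2.toList kv.1) t) s =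
      (kAT t s).or ((l.find? (fun kv => kv.2 == String.ofList s)).map (·.1)) := by
  induction l with
  | nil => intro t s hs; simp
  | cons kv rest ih =>
      intro t s hs
      have hms : String.ofList s ≠ "" := by
        intro h
        apply hs
        have := congrArg String.toList h
        simpa using this
      simp only [List.foldl_cons]
      by_cases hv : kv.2 = ""
      · rw [if_pos hv, List.find?_cons_of_neg (by simp [hv, Ne.symm hms]), ih t s hs]
      · rw [if_neg hv, ih _ s hs, kAT_insertB]
        by_cases heq : s = kv.2.toList
        · have hveq : kv.2 = String.ofList s := by rw [heq, String.ofList_toList]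
          rw [if_pos heq, List.find?_cons_of_pos (by simp [hveq]), heq]
          cases kAT t kv.2.toList <;> simp
        · have hvne : ¬ (kv.2 = String.ofList s) := by
            intro h
            exact heq (by rw [h, String.toList_ofList])
          rw [if_neg heq, List.find?_cons_of_neg (by simp [hvne])]

-- A's inner scan is the first key whose value equals the accumulator
lemma decodeScanA_eq_find (d : PySem.Dict String String) (ks : List String) (ex : List (List Char)) (acc : List Char) :
    decodeScanA d ks ex acc =
      match ks.find? (fun k => d.get? k == some (String.ofList acc)) with
      | some k => (ex ++ [k.toList], [])
      | none => (ex, acc) := by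
  induction ks with
  | nil => rfl
  | cons k rest ih =>
      by_cases h : d.get? k = some (String.ofList acc)
      · rw [List.find?_cons_of_pos (by simpa using h)]
        simp [decodeScanA, h]
      · rw [List.find?_cons_of_neg (by simpa using h)]
        simp only [decodeScanA, if_neg h]
        exact ih

-- finding a key by its looked-up value = finding an item by value (keys unique)
lemma find_keys_eq_find_items (d : PySem.Dict String String) (hnd : d.keys.Nodup) (s : String) :
    (d.keys.find? (fun k => d.get? k == some s)) = (d.items.find? (fun kv => kv.2 == s)).map (·.1) := by
  have hkeys : d.keys = d.items.map (·.1) := rfl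
  rw [hkeys, List.find?_map]
  have key : ∀ (l : List (String × String)), (∀ kv ∈ l, d.get? kv.1 = some kv.2) →
      l.find? ((fun k => d.get? k == some s) ∘ (·.1)) = l.find? (fun kv => kv.2 == s) := by
    intro l hl
    induction l with
    | nil => rfl
    | cons kv rest ih =>
        have h1 : d.get? kv.1 = some kv.2 := hl kv (by simp)
        by_cases hv : kv.2 = s
        · rw [List.find?_cons_of_pos (p := (fun k => d.get? k == some s) ∘ fun x : String × String => x.1)
                (by show (d.get? kv.1 == some s) = true; rw [h1]; simpa using hv),
              List.find?_cons_of_pos (by simpa using hv)]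
        · rw [List.find?_cons_of_neg (p := (fun k => d.get? k == some s) ∘ fun x : String × String => x.1)
                (by show ¬((d.get? kv.1 == some s) = true); rw [h1]; simpa using hv),
              List.find?_cons_of_neg (by simpa using hv)]
          exact ih (fun p hp => hl p (by simp [hp]))
  rw [key d.items (fun kv hkv =>
    PySem.Dict.get?_of_mem_items d (by simpa using hkv) hnd)]

-- the decode walk: A's state is (emitted, buffer); B's state is (emitted, current node),
-- related by 'current node = walkT root buffer'
lemma loop_eq (d : PySem.Dict String String) (r : BTrie)
    (hnd : d.keys.Nodup) (H : ∀ s : List Char, s ≠ [] →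
      kAT r s = (d.items.find? (fun kv => kv.2 == String.ofList s)).map (·.1)) :
    ∀ (l : List Char) (ex : List (List Char)) (acc : List Char) (cur : Option BTrie),
      cur = walkT r acc →
      (l.foldl (fun (s : List (List Char) × List Char) el =>
          decodeScanA d d.keys s.1 (s.2 ++ [el])) (ex, acc)).1 =
      (l.foldl (fun (s : List (List Char) × Option BTrie) ch =>
          match s.2 with
          | none => s
          | some t =>
            match childGetB t.children ch with
            | none => (s.1, none)
            | some t' =>
              match t'.key with
              | some k => (s.1 ++ [k.toList], some r)
              | none => (s.1, some t')) (ex, cur)).1 := by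
  intro l
  induction l with
  | nil => intro ex acc cur _; rfl
  | cons el rest ih =>
      intro ex acc cur hcur
      simp only [List.foldl_cons]
      have hfind : (d.keys.find? (fun k => d.get? k == some (String.ofList (acc ++ [el])))) =
          (d.items.find? (fun kv => kv.2 == String.ofList (acc ++ [el]))).map (·.1) :=
        find_keys_eq_find_items d hnd (String.ofList (acc ++ [el]))
      have hk : kAT r (acc ++ [el]) =
          (d.items.find? (fun kv => kv.2 == String.ofList (acc ++ [el]))).map (·.1) :=
        H (acc ++ [el]) (by simp)
      have hwalk : walkT r (acc ++ [el]) = (walkT r acc).bind (fun t => childGetB t.children el) := by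
        rw [walkT_append]
        congr 1
        funext u
        simp only [walkT]
        cases childGetB u.children el <;> rfl
      rw [decodeScanA_eq_find, hfind, ← hk]
      cases hc : cur with
      | none =>
          have hw : walkT r (acc ++ [el]) = none := by rw [hwalk, ← hcur, hc]; rfl
          have : kAT r (acc ++ [el]) = none := by simp [kAT, hw]
          simp only [this]
          exact ih ex (acc ++ [el]) none (by rw [hw])
      | some t =>
          have hw : walkT r (acc ++ [el]) = childGetB t.children el := by
            rw [hwalk, ← hcur, hc]; rfl
          cases hcg : childGetB t.children el with
          | none =>
              have : kAT r (acc ++ [el]) = none := by simp [kAT, hw, hcg]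
              simp only [this, hcg]
              exact ih ex (acc ++ [el]) none (by rw [hw, hcg])
          | some t' =>
              have hkat : kAT r (acc ++ [el]) = t'.key := by simp [kAT, hw, hcg]
              cases hk' : t'.key with
              | some k =>
                  simp only [hkat, hk', hcg]
                  exact ih (ex ++ [k.toList]) [] (some r) rfl
              | none =>
                  simp only [hkat, hk', hcg]
                  exact ih ex (acc ++ [el]) (some t') (by rw [hw, hcg])

theorem decode_eq (encoded : String) (code : List (String × String)) :
    decode_func encoded code = decode_func_alt encoded code := by
  unfold decode_func decode_func_alt
  simp only
  refine congrArg String.ofList (congrArg List.flatten ?_)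
  apply loop_eq
  · exact PySem.Dict.nodup_keys_ofList code
  · intro s hs
    unfold buildB
    rw [build_go _ _ s hs]
    cases s with
    | nil => exact absurd rfl hs
    | cons c rest => simp [kAT_cons, childGetB]
  · rfl

-- ===== VERDICT (by name: the statement is the Claim_ definition above) =====
theorem decode_func_spec : Claim_equal_decode_func := by
  intro encoded code _
  unfold Spec_decode_func
  exact decode_eq encoded code
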